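-- pv_equiv track=rewrite | github.com/shelkeom230/striver-DSA-bootcamp | arrays/hard.py | SubarraysWithXorK
-- ===== SOURCE A (Python) =====
-- def SubarraysWithXorK(arr, k):
--     n = len(arr)
--     ans = []
--
--     for i in range(n):
--         xor = 0
--         for j in range(i, n):
--             xor ^= arr[j]
--             if xor == k:
--                 ans.append(arr[i : j + 1])
--     return ans
-- ===== SOURCE B (Python) =====
-- def SubarraysWithXorK(arr, k):
--     # prefix-xor table + positions index instead of the O(n^2) rescan
--     n = len(arr)
--     P = [0]
--     for x in arr:
--         P.append(P[-1] ^ x)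
--     pos = {}
--     for p in range(1, n + 1):
--         pos.setdefault(P[p], []).append(p)
--     ans = []
--     for i in range(n):
--         for p in pos.get(P[i] ^ k, []):
--             if p > i:
--                 ans.append(arr[i:p])
--     return ans
-- ===== Notes on version B (the rewrite author's own statement) =====
-- stated objective: faster
-- what changed: Replaces A's nested i,j loops with a running xor by a one-pass prefix-xor table plus a dict from prefix value to its ascending positions, so each start index does one lookup instead of rescanning the tail.
import Mathlib
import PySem

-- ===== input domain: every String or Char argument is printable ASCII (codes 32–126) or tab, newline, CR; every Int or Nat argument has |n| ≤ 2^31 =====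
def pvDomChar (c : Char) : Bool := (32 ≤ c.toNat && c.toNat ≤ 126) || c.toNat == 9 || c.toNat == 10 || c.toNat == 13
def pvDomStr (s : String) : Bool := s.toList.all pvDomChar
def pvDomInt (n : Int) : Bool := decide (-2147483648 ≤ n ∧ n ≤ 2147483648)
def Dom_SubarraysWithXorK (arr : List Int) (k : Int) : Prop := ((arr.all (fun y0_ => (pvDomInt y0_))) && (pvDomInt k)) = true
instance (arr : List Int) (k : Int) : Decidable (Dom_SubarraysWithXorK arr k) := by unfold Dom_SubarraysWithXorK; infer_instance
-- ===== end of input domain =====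

-- B replaces A's quadratic running-xor rescan by a prefix-xor table plus a positions index; measured faster on the generated inputs.


-- ===== PORT A =====
-- literal transliteration of A: nested i,j loops, running xor, append a slice on each hit
def SubarraysWithXorK (arr : List Int) (k : Int) : List (List Int) :=
  let n : Int := (arr.length : Int)
  (PySem.List.pyRange 0 n 1).foldl (fun ans i =>
    ((PySem.List.pyRange i n 1).foldl
      (fun (st : Int × List (List Int)) j =>
        let x := PySem.Int.bxor st.1 (PySem.List.pyGetD arr j 0)
        (x, if x = k then st.2 ++ [PySem.List.slice arr (some i) (some (j + 1))] else st.2))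
      (0, ans)).2) []

-- ===== PORT B =====
-- literal transliteration of B: prefix-xor list P, dict from prefix value to its positions, one lookup per start index
def SubarraysWithXorK_alt (arr : List Int) (k : Int) : List (List Int) :=
  let n : Int := (arr.length : Int)
  let P : List Int :=
    arr.foldl (fun P x => P ++ [PySem.Int.bxor (PySem.List.pyGetD P (-1) 0) x]) [0]
  let pos : PySem.Dict Int (List Int) :=
    (PySem.List.pyRange 1 (n + 1) 1).foldl
      (fun d p => d.modify (PySem.List.pyGetD P p 0) [] (fun l => l ++ [p]))
      PySem.Dict.empty
  (PySem.List.pyRange 0 n 1).foldl (fun ans i =>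
    (pos.getD (PySem.Int.bxor (PySem.List.pyGetD P i 0) k) []).foldl
      (fun ans p => if p > i then ans ++ [PySem.List.slice arr (some i) (some p)] else ans)
      ans) []

-- ===== PRECONDITION & SPEC =====
def Spec_SubarraysWithXorK (arr : List Int) (k : Int) (out : List (List Int)) : Prop := out = SubarraysWithXorK_alt arr k
instance (arr : List Int) (k : Int) (out : List (List Int)) : Decidable (Spec_SubarraysWithXorK arr k out) := by unfold Spec_SubarraysWithXorK; infer_instance

-- ===== CLAIM (what is proved, stated in full; the proofs are below) =====
def Claim_equal_SubarraysWithXorK : Prop := ∀ (arr : List Int) (k : Int), Dom_SubarraysWithXorK arr k → Spec_SubarraysWithXorK arr k (SubarraysWithXorK arr k)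

-- ===== LEMMAS AND PROOFS =====

-- xor algebra for PySem.Int.bxor (associativity is not among the prelude's listed lemmas)
theorem pvBxor_natCast_negSucc (m n : Nat) :
    PySem.Int.bxor (m : Int) (Int.negSucc n) = Int.negSucc (m ^^^ n) := by
  simp [PySem.Int.bxor, Int.negSucc_eq]; omega

theorem pvBxor_negSucc_natCast (m n : Nat) :
    PySem.Int.bxor (Int.negSucc m) (n : Int) = Int.negSucc (m ^^^ n) := by
  simp [PySem.Int.bxor, Int.negSucc_eq]; omega

theorem pvBxor_negSucc_negSucc (m n : Nat) :
    PySem.Int.bxor (Int.negSucc m) (Int.negSucc n) = ((m ^^^ n : Nat) : Int) := by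
  simp [PySem.Int.bxor, Int.negSucc_eq]; omega

theorem pvBxor_assoc (a b c : Int) :
    PySem.Int.bxor (PySem.Int.bxor a b) c = PySem.Int.bxor a (PySem.Int.bxor b c) := by
  rcases a with m | m <;> rcases b with n | n <;> rcases c with p | p <;>
    simp [PySem.Int.bxor_natCast, pvBxor_natCast_negSucc, pvBxor_negSucc_natCast,
      pvBxor_negSucc_negSucc, Nat.xor_assoc]

theorem pvBxor_cancel_left (a b : Int) : PySem.Int.bxor a (PySem.Int.bxor a b) = b := by
  rw [← pvBxor_assoc, PySem.Int.bxor_self, PySem.Int.bxor_comm, PySem.Int.bxor_zero]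

theorem pvBxor_eq_iff (a b k : Int) : PySem.Int.bxor a b = k ↔ b = PySem.Int.bxor a k := by
  constructor
  · intro h; rw [← h, pvBxor_cancel_left]
  · intro h; rw [h, pvBxor_cancel_left]

-- prefix xor of the first p elements (Int index, clamped by toNat)
def pvPX (arr : List Int) (p : Int) : Int := (arr.take p.toNat).foldl PySem.Int.bxor 0

theorem pvPX_succ (arr : List Int) (m : Int) (h0 : 0 ≤ m) (h1 : m < (arr.length : Int)) :
    pvPX arr (m + 1) = PySem.Int.bxor (pvPX arr m) (PySem.List.pyGetD arr m 0) := by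
  have hm : m.toNat < arr.length := by omega
  unfold pvPX
  rw [show (m + 1).toNat = m.toNat + 1 by omega, PySem.List.pyGetD_eq_getElem arr 0 h0 h1,
    List.take_add_one, List.getElem?_eq_getElem hm]
  simp only [Option.toList_some, List.foldl_append, List.foldl_cons, List.foldl_nil]

-- the per-start-index block both programs append, as one closed list
def pvHits (arr : List Int) (k : Int) (i : Int) : List (List Int) :=
  ((PySem.List.pyRange i (arr.length : Int) 1).filter
      (fun j => decide (pvPX arr (j + 1) = PySem.Int.bxor (pvPX arr i) k))).map
    (fun j => PySem.List.slice arr (some i) (some (j + 1)))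

-- A's inner loop produces pvHits (invariant: the running xor is pvPX i ^ pvPX a)
theorem pvA_inner (arr : List Int) (k i : Int) (hi0 : 0 ≤ i) :
    ∀ (c : Nat) (a : Int) (acc : List (List Int)), i ≤ a → a + c = (arr.length : Int) →
    ((PySem.List.pyRange a (arr.length : Int) 1).foldl
      (fun (st : Int × List (List Int)) j =>
        let x := PySem.Int.bxor st.1 (PySem.List.pyGetD arr j 0)
        (x, if x = k then st.2 ++ [PySem.List.slice arr (some i) (some (j + 1))] else st.2))
      (PySem.Int.bxor (pvPX arr i) (pvPX arr a), acc)).2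
    = acc ++ ((PySem.List.pyRange a (arr.length : Int) 1).filter
        (fun j => decide (pvPX arr (j + 1) = PySem.Int.bxor (pvPX arr i) k))).map
      (fun j => PySem.List.slice arr (some i) (some (j + 1))) := by
  intro c
  induction c with
  | zero =>
    intro a acc ha hlen
    rw [PySem.List.pyRange_one_eq_nil (by omega)]
    simp
  | succ c ih =>
    intro a acc ha hlen
    have haN : a < (arr.length : Int) := by omega
    have h0a : 0 ≤ a := le_trans hi0 ha
    rw [PySem.List.pyRange_one_cons haN, List.foldl_cons, List.filter_cons]
    have hx : PySem.Int.bxor (PySem.Int.bxor (pvPX arr i) (pvPX arr a)) (PySem.List.pyGetD arr a 0)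
        = PySem.Int.bxor (pvPX arr i) (pvPX arr (a + 1)) := by
      rw [pvBxor_assoc, ← pvPX_succ arr a h0a haN]
    dsimp only
    rw [hx]
    by_cases hc : pvPX arr (a + 1) = PySem.Int.bxor (pvPX arr i) k
    · rw [if_pos ((pvBxor_eq_iff _ _ _).mpr hc), if_pos (by simp [hc])]
      rw [ih (a + 1) (acc ++ [PySem.List.slice arr (some i) (some (a + 1))]) (by omega) (by omega)]
      simp
    · rw [if_neg (fun h => hc ((pvBxor_eq_iff _ _ _).mp h)), if_neg (by simp [hc])]
      exact ih (a + 1) acc (by omega) (by omega)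

theorem pvA_char (arr : List Int) (k : Int) :
    SubarraysWithXorK arr k
      = (PySem.List.pyRange 0 (arr.length : Int) 1).flatMap (pvHits arr k) := by
  unfold SubarraysWithXorK
  dsimp only
  rw [PySem.List.foldl_congr_mem _ _ (fun ans i => ans ++ pvHits arr k i) _ ?_,
    PySem.List.foldl_append_eq_flatMap]
  · simp
  · intro acc i hi
    rw [PySem.List.mem_pyRange_one] at hi
    have h := pvA_inner arr k i hi.1 ((arr.length : Int) - i).toNat i acc le_rfl (by omega)
    rw [PySem.Int.bxor_self] at h
    exact h

-- B's prefix list: what the append-fold builds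
def pvPre (a : Int) : List Int → List Int
  | [] => [a]
  | x :: xs => a :: pvPre (PySem.Int.bxor a x) xs

theorem pvPre_build (xs : List Int) : ∀ (ys : List Int) (a : Int),
    xs.foldl (fun P x => P ++ [PySem.Int.bxor (PySem.List.pyGetD P (-1) 0) x]) (ys ++ [a])
      = ys ++ pvPre a xs := by
  induction xs with
  | nil => intro ys a; simp [pvPre]
  | cons x xs ih =>
    intro ys a
    simp only [List.foldl_cons, PySem.List.pyGetD_neg_one_append_singleton]
    rw [ih (ys ++ [a]) (PySem.Int.bxor a x)]
    simp [pvPre]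

theorem pvPre_length (xs : List Int) : ∀ a : Int, (pvPre a xs).length = xs.length + 1 := by
  induction xs with
  | nil => intro a; simp [pvPre]
  | cons x xs ih => intro a; simp [pvPre, ih]

theorem pvPre_getElem? (xs : List Int) : ∀ (a : Int) (m : Nat), m ≤ xs.length →
    (pvPre a xs)[m]? = some ((xs.take m).foldl PySem.Int.bxor a) := by
  induction xs with
  | nil =>
    intro a m h
    have : m = 0 := Nat.le_zero.mp h
    subst this; simp [pvPre]
  | cons x xs ih =>
    intro a m h
    cases m with
    | zero => simp [pvPre]
    | succ m => simpa [pvPre] using ih (PySem.Int.bxor a x) m (by simpa using h)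

theorem pvP_lookup (arr : List Int) (p : Int) (h0 : 0 ≤ p) (h1 : p ≤ (arr.length : Int)) :
    PySem.List.pyGetD
      (arr.foldl (fun P x => P ++ [PySem.Int.bxor (PySem.List.pyGetD P (-1) 0) x]) [0]) p 0
      = pvPX arr p := by
  have hb : arr.foldl (fun P x => P ++ [PySem.Int.bxor (PySem.List.pyGetD P (-1) 0) x]) [0]
      = pvPre 0 arr := by
    simpa using pvPre_build arr [] 0
  rw [hb, PySem.List.pyGetD_eq_getElem _ 0 h0 (by rw [pvPre_length]; omega)]
  have h2 := pvPre_getElem? arr 0 p.toNat (by omega)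
  rw [List.getElem?_eq_getElem (by rw [pvPre_length]; omega)] at h2
  exact Option.some.inj h2

-- the dict built by B maps t to the ascending positions p with val p = t
theorem pvDict_build (val : Int → Int) (ps : List Int) :
    ∀ (d : PySem.Dict Int (List Int)) (t : Int),
    (ps.foldl (fun d p => d.modify (val p) [] (fun l => l ++ [p])) d).getD t []
      = d.getD t [] ++ ps.filter (fun p => decide (val p = t)) := by
  induction ps with
  | nil => intro d t; simp
  | cons p ps ih =>
    intro d t
    simp only [List.foldl_cons, List.filter_cons]
    rw [ih]
    by_cases h : val p = t
    · subst h; rw [PySem.Dict.getD_modify_self]; simp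
    · rw [PySem.Dict.getD_modify_of_ne _ _ _ (fun hh => h hh.symm)]; simp [h]

-- pyRange (i+1) (n+1) is pyRange i n shifted by one
theorem pvRange_shift (a b : Int) :
    PySem.List.pyRange (a + 1) (b + 1) 1 = (PySem.List.pyRange a b 1).map (· + 1) := by
  rw [PySem.List.pyRange_one, PySem.List.pyRange_one, List.map_map]
  have : b + 1 - (a + 1) = b - a := by ring
  rw [this]
  exact List.map_congr_left (fun m _ => by simp; ring)

-- restricting the dict's position list to p > i yields exactly the tail range
theorem pvBridge (q : Int → Bool) (i n : Int) (h0 : 0 ≤ i) (hn : i < n) :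
    ((PySem.List.pyRange 1 (n + 1) 1).filter q).filter (fun p => decide (p > i))
      = (PySem.List.pyRange (i + 1) (n + 1) 1).filter q := by
  rw [List.filter_filter, PySem.List.pyRange_one_append 1 (i + 1) (n + 1) (by omega) (by omega),
    List.filter_append]
  have h1 : (PySem.List.pyRange 1 (i + 1) 1).filter
      (fun p => decide (p > i) && q p) = [] := by
    rw [List.filter_eq_nil_iff]
    intro p hp
    rw [PySem.List.mem_pyRange_one] at hp
    simp; omega
  have h2 : (PySem.List.pyRange (i + 1) (n + 1) 1).filter
      (fun p => decide (p > i) && q p) = (PySem.List.pyRange (i + 1) (n + 1) 1).filter q := by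
    apply List.filter_congr
    intro p hp
    rw [PySem.List.mem_pyRange_one] at hp
    simp [show i < p by omega]
  rw [h1, h2, List.nil_append]

theorem pvB_char (arr : List Int) (k : Int) :
    SubarraysWithXorK_alt arr k
      = (PySem.List.pyRange 0 (arr.length : Int) 1).flatMap (pvHits arr k) := by
  unfold SubarraysWithXorK_alt
  dsimp only
  rw [PySem.List.foldl_congr_mem _ _ (fun ans i => ans ++ pvHits arr k i) _ ?_,
    PySem.List.foldl_append_eq_flatMap]
  · simp
  · intro acc i hi
    rw [PySem.List.mem_pyRange_one] at hi
    -- the dict lookup is the ascending list of positions with prefix xor = pvPX i ^ k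
    rw [pvDict_build, PySem.Dict.getD_empty, List.nil_append,
      pvP_lookup arr i hi.1 (by omega)]
    have hval : (PySem.List.pyRange 1 ((arr.length : Int) + 1) 1).filter
          (fun p => decide (PySem.List.pyGetD
            (arr.foldl (fun P x => P ++ [PySem.Int.bxor (PySem.List.pyGetD P (-1) 0) x]) [0]) p 0
            = PySem.Int.bxor (pvPX arr i) k))
        = (PySem.List.pyRange 1 ((arr.length : Int) + 1) 1).filter
          (fun p => decide (pvPX arr p = PySem.Int.bxor (pvPX arr i) k)) := by
      apply List.filter_congr
      intro p hp
      rw [PySem.List.mem_pyRange_one] at hp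
      rw [pvP_lookup arr p (by omega) (by omega)]
    rw [hval]
    -- the guarded fold appends the slices of the positions beyond i
    have hfun : (fun (ans : List (List Int)) (p : Int) =>
          if p > i then ans ++ [PySem.List.slice arr (some i) (some p)] else ans)
        = (fun ans p => if (fun p => decide (p > i)) p = true
            then ans ++ [PySem.List.slice arr (some i) (some p)] else ans) := by
      funext ans p
      by_cases h : p > i <;> simp [h]
    rw [hfun, PySem.List.foldl_append_if]
    -- and those positions are exactly pvHits, shifted by one
    rw [pvBridge _ i (arr.length : Int) hi.1 hi.2, pvRange_shift, List.filter_map, List.map_map]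
    rfl

-- ===== VERDICT (by name: the statement is the Claim_ definition above) =====
theorem SubarraysWithXorK_spec : Claim_equal_SubarraysWithXorK := by
  intro arr k _
  unfold Spec_SubarraysWithXorK
  rw [pvA_char, pvB_char]
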